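-- pv_equiv track=rewrite | github.com/coachpo/prism-backend | app/services/loadbalancer/policy.py | normalize_failover_status_codes
-- ===== SOURCE A (Python) =====
-- def normalize_failover_status_codes(value: object) -> tuple[int, ...]:
--     if not isinstance(value, (list, tuple, set, frozenset)):
--         raise ValueError("failover_status_codes must be a list of HTTP status codes")
--
--     items = list(value)
--     normalized: set[int] = set()
--     for item in items:
--         if not isinstance(item, int) or isinstance(item, bool):
--             raise ValueError("failover_status_codes must contain integers only")
--         if item < 100 or item > 599:
--             raise ValueError(
--                 "failover_status_codes must contain valid HTTP status codes"
--             )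
--         normalized.add(item)
--
--     if len(normalized) != len(items):
--         raise ValueError("failover_status_codes must not contain duplicates")
--
--     if not normalized:
--         raise ValueError("failover_status_codes must contain at least one status code")
--
--     return tuple(sorted(normalized))
-- ===== SOURCE B (Python) =====
-- def normalize_failover_status_codes(value: object) -> tuple[int, ...]:
--     if not isinstance(value, (list, tuple, set, frozenset)):
--         raise ValueError("failover_status_codes must be a list of HTTP status codes")
--
--     for item in value:
--         if not isinstance(item, int) or isinstance(item, bool):
--             raise ValueError("failover_status_codes must contain integers only")
--         if item < 100 or item > 599:
--             raise ValueError(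
--                 "failover_status_codes must contain valid HTTP status codes"
--             )
--
--     # Build the result already sorted by insertion; a duplicate is found at its
--     # insertion point, so no set and no sorted() call are needed.
--     result: list[int] = []
--     for item in value:
--         i = 0
--         while i < len(result) and result[i] < item:
--             i += 1
--         if i < len(result) and result[i] == item:
--             raise ValueError("failover_status_codes must not contain duplicates")
--         result.insert(i, item)
--
--     if not result:
--         raise ValueError("failover_status_codes must contain at least one status code")
--
--     return tuple(result)
-- ===== Notes on version B (the rewrite author's own statement) =====
-- stated objective: alternative
-- what changed: B replaces A's set-based dedup plus sorted() by a hand-written insertion sort: after a pure validation pass, each code is inserted into its ordered position in the growing result list, and a duplicate is detected at the insertion point, so neither a set nor a library sort is used and the result list is returned as-is.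
import Mathlib
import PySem

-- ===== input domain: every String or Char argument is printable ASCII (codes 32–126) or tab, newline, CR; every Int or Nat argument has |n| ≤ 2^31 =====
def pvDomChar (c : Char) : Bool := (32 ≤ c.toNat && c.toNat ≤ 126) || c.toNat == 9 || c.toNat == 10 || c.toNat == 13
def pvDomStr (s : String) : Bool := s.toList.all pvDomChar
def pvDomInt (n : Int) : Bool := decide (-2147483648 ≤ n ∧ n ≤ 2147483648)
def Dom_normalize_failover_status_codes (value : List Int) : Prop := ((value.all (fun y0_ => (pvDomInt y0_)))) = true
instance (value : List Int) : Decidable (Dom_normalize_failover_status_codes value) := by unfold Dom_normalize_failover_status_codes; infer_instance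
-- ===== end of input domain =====

-- ===== PORT A =====
-- B replaces set-based dedup + sorted() by a hand-written insertion sort with duplicate
-- detection at the insertion point (objective: alternative, same asymptotic value not claimed).
-- Port of A: validate each item (range 100..599 — raises excluded by Pre_), add it to a set;
-- duplicate and empty checks raise (excluded by Pre_); return sorted(set).
def normalize_failover_status_codes (value : List Int) : List Int :=
  let normalized : PySem.Set Int := value.foldl PySem.Set.add PySem.Set.empty
  PySem.List.sorted normalized (fun x => x) false

-- ===== PORT B =====
-- Port of B's inner loop: scan past smaller elements (the while loop), then the duplicate
-- check (Python raises there — excluded by Pre_), then insert at the found position.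
def pvInsertUnique (item : Int) (result : List Int) : List Int :=
  match result with
  | [] => [item]
  | y :: t =>
    if y < item then y :: pvInsertUnique item t
    else if y == item then y :: t   -- Python raises "must not contain duplicates" here (excluded by Pre_)
    else item :: y :: t

-- Port of B: validation raises are excluded by Pre_; insert each item into its sorted
-- position; the empty check raises (excluded by Pre_); return the built list.
def normalize_failover_status_codes_alt (value : List Int) : List Int :=
  value.foldl (fun result item => pvInsertUnique item result) []

-- ===== PRECONDITION & SPEC =====
-- Pre_ is exactly where A returns: every code in 100..599 (else ValueError),
-- no duplicates, and at least one element.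
def Pre_normalize_failover_status_codes (value : List Int) : Prop :=
  value ≠ [] ∧ value.Nodup ∧ ∀ x ∈ value, 99 < x ∧ x < 600
instance (value : List Int) : Decidable (Pre_normalize_failover_status_codes value) := by
  unfold Pre_normalize_failover_status_codes; infer_instance

def pvWitness_normalize_failover_status_codes : List Int := [151, 252, 353, 454, 555]

def Spec_normalize_failover_status_codes (value : List Int) (out : List Int) : Prop := out = normalize_failover_status_codes_alt value
instance (value : List Int) (out : List Int) : Decidable (Spec_normalize_failover_status_codes value out) := by unfold Spec_normalize_failover_status_codes; infer_instance

-- ===== CLAIM (what is proved, stated in full; the proofs are below) =====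
def Claim_equal_normalize_failover_status_codes : Prop := ∀ (value : List Int), Dom_normalize_failover_status_codes value → Pre_normalize_failover_status_codes value → Spec_normalize_failover_status_codes value (normalize_failover_status_codes value)

-- ===== LEMMAS AND PROOFS =====

-- On a duplicate-free list, building a Python set element by element reproduces the list.
lemma foldl_set_add_disjoint (value : List Int) (s : List Int)
    (h : value.Nodup) (hd : ∀ x ∈ value, x ∉ s) :
    value.foldl PySem.Set.add s = s ++ value := by
  induction value generalizing s with
  | nil => simp
  | cons a t ih =>
    simp only [List.nodup_cons] at h
    have ha : PySem.Set.add s a = s ++ [a] := by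
      simp [PySem.Set.add, List.contains_eq_mem, hd a (by simp)]
    simp only [List.foldl_cons, ha]
    rw [ih (s ++ [a]) h.2]
    · simp
    · intro x hx
      simp only [List.mem_append, List.mem_singleton]
      rintro (hs | rfl)
      · exact hd x (by simp [hx]) hs
      · exact h.1 hx

lemma foldl_set_add_of_nodup (value : List Int) (h : value.Nodup) :
    value.foldl PySem.Set.add PySem.Set.empty = value := by
  simpa [PySem.Set.empty] using foldl_set_add_disjoint value [] h (by simp)

-- Inserting a fresh element into a strictly sorted list keeps it strictly sorted
-- and yields a permutation of the element consed on.
lemma pvInsertUnique_spec (x : Int) (l : List Int)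
    (hs : l.Pairwise (· < ·)) (hx : x ∉ l) :
    (pvInsertUnique x l).Perm (x :: l) ∧ (pvInsertUnique x l).Pairwise (· < ·) := by
  induction l with
  | nil => simp [pvInsertUnique]
  | cons y t ih =>
    simp only [List.mem_cons, not_or] at hx
    rw [List.pairwise_cons] at hs
    by_cases hlt : y < x
    · have ih' := ih hs.2 hx.2
      refine ⟨?_, ?_⟩
      · simp only [pvInsertUnique, if_pos hlt]
        exact (ih'.1.cons y).trans (List.Perm.swap x y t)
      · simp only [pvInsertUnique, if_pos hlt]
        rw [List.pairwise_cons]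
        refine ⟨?_, ih'.2⟩
        intro z hz
        rcases List.mem_cons.mp ((List.Perm.mem_iff ih'.1).mp hz) with rfl | h
        · exact hlt
        · exact hs.1 z h
    · have hxy : x < y := lt_of_le_of_ne (not_lt.mp hlt) hx.1
      have hyx : y ≠ x := fun h => hx.1 h.symm
      have hne : (y == x) = false := by simp [hyx]
      refine ⟨?_, ?_⟩
      · simp [pvInsertUnique, if_neg hlt, hne]
      · simp only [pvInsertUnique, if_neg hlt, hne, Bool.false_eq_true, if_false]
        rw [List.pairwise_cons]
        refine ⟨?_, List.pairwise_cons.mpr hs⟩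
        intro z hz
        rcases List.mem_cons.mp hz with rfl | h
        · exact hxy
        · exact lt_trans hxy (hs.1 z h)

-- Loop invariant for B's fold: starting from a strictly sorted accumulator disjoint
-- from a duplicate-free remainder, the fold yields a strictly sorted permutation.
lemma foldl_pvInsertUnique (value : List Int) (acc : List Int)
    (hnd : value.Nodup) (hacc : acc.Pairwise (· < ·)) (hd : ∀ x ∈ value, x ∉ acc) :
    (value.foldl (fun result item => pvInsertUnique item result) acc).Perm (acc ++ value) ∧
    (value.foldl (fun result item => pvInsertUnique item result) acc).Pairwise (· < ·) := by
  induction value generalizing acc with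
  | nil => simpa using hacc
  | cons a t ih =>
    simp only [List.nodup_cons] at hnd
    have hstep := pvInsertUnique_spec a acc hacc (hd a (by simp))
    have hdisj : ∀ x ∈ t, x ∉ pvInsertUnique a acc := by
      intro x hx hmem
      rcases List.mem_cons.mp ((List.Perm.mem_iff hstep.1).mp hmem) with h | h
      · exact hnd.1 (h ▸ hx)
      · exact hd x (by simp [hx]) h
    have ih' := ih (pvInsertUnique a acc) hnd.2 hstep.2 hdisj
    refine ⟨?_, ih'.2⟩
    simp only [List.foldl_cons]
    exact (ih'.1.trans (hstep.1.append_right t)).trans List.perm_middle.symm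

-- ===== VERDICT (by name: the statement is the Claim_ definition above) =====
theorem normalize_failover_status_codes_spec : Claim_equal_normalize_failover_status_codes := by
  intro value _ hpre
  unfold Spec_normalize_failover_status_codes normalize_failover_status_codes normalize_failover_status_codes_alt
  rw [foldl_set_add_of_nodup value hpre.2.1]
  have h := foldl_pvInsertUnique value [] hpre.2.1 (by simp) (by simp)
  show PySem.List.sorted value (fun x => x) false
      = value.foldl (fun result item => pvInsertUnique item result) []
  rw [PySem.List.sorted_eq_of_perm_of_pairwise_lt value _ (fun x => x) (by simpa using h.1) h.2]
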